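-- pv_equiv track=rewrite | github.com/pypi-data/pypi-mirror-138 | packages/PDSUtilities/PDSUtilities-0.1.26.tar.gz/PDSUtilities-0.1.26/PDSUtilities/plotly/get_specs_from_mosaic.py | get_specs_from_mosaic
-- ===== SOURCE A (Python) =====
-- def get_specs_from_mosaic(mosaic):
--     def get_spec_from_mosaic(mosaic, row, col):
--         rows, cols = [], []
--         for r in range(len(mosaic)):
--             for c in range(len(mosaic[r])):
--                 if mosaic[r][c] == mosaic[row][col]:
--                     rows.append(r)
--                     cols.append(c)
--         min_of_rows, max_of_rows = min(rows), max(rows)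
--         min_of_cols, max_of_cols = min(cols), max(cols)
--         #
--         if row == min_of_rows and col == min_of_cols:
--             spec = {}
--             if min_of_rows < max_of_rows:
--                 spec['rowspan'] = max_of_rows - min_of_rows + 1
--             if min_of_cols < max_of_cols:
--                 spec['colspan'] = max_of_cols - min_of_cols + 1
--             return spec
--         return None
--
--     if isinstance(mosaic, str):
--         mosaic = [line.strip() for line in mosaic.splitlines()]
--     mosaic = [[c for c in line] for line in mosaic if line]
--     return [
--         [
--             get_spec_from_mosaic(mosaic, r, c)
--             for c in range(len(mosaic[r]))
--         ] for r in range(len(mosaic))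
--     ]
-- ===== SOURCE B (Python) =====
-- def get_specs_from_mosaic(mosaic):
--     if isinstance(mosaic, str):
--         mosaic = [line.strip() for line in mosaic.splitlines()]
--     grid = [[c for c in line] for line in mosaic if line]
--     # One pass: record each label's min/max row and col bounds.
--     bounds = {}
--     for r, line in enumerate(grid):
--         for c, ch in enumerate(line):
--             b = bounds.get(ch)
--             if b is None:
--                 bounds[ch] = (r, r, c, c)
--             else:
--                 r0, r1, c0, c1 = b
--                 bounds[ch] = (min(r0, r), max(r1, r), min(c0, c), max(c1, c))
--     # O(1) per cell.
--     specs = []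
--     for r, line in enumerate(grid):
--         row = []
--         for c, ch in enumerate(line):
--             r0, r1, c0, c1 = bounds[ch]
--             if r == r0 and c == c0:
--                 spec = {}
--                 if r0 < r1:
--                     spec['rowspan'] = r1 - r0 + 1
--                 if c0 < c1:
--                     spec['colspan'] = c1 - c0 + 1
--                 row.append(spec)
--             else:
--                 row.append(None)
--         specs.append(row)
--     return specs
-- ===== Notes on version B (the rewrite author's own statement) =====
-- stated objective: faster
-- what changed: A rescans the whole grid for every cell to find its label's bounding box; B makes one pass recording each label's min/max row/col bounds in a dict, then emits each cell's spec in O(1).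
import Mathlib
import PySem

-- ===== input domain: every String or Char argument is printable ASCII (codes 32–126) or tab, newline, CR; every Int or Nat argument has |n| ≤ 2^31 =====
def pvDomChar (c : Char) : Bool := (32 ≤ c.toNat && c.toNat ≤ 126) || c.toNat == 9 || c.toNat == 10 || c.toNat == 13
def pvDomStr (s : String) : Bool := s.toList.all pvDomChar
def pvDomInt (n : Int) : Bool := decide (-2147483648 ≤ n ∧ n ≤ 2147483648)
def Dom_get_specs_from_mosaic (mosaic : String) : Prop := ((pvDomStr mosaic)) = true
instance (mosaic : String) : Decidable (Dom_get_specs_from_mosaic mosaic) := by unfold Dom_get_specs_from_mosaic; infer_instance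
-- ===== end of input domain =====

-- B replaces A's per-cell full-grid rescan by one pass that records each label's
-- min/max row/col bounds in a dict, then emits each cell's spec in O(1) (objective: faster).

-- ===== PORT A =====
-- shared preprocessing (both Pythons contain the identical two lines):
-- mosaic = [line.strip() for line in mosaic.splitlines()]; [[c for c in line] for line in mosaic if line]
def pvGrid (mosaic : String) : List (List Char) :=
  (((PySem.Str.splitlines mosaic).map (fun line => PySem.Str.strip line)).filter
    (fun line => line ≠ "")).map String.toList

-- literal port of A's inner helper get_spec_from_mosaic (row/col always in range;
-- rows/cols are nonempty since the cell itself matches, so the .getD 0 defaults are never hit)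
def pvSpecA (g : List (List Char)) (row col : Nat) : Option (List (String × Int)) :=
  let t := (g.getD row []).getD col ' '
  let rc := (List.range g.length).foldl (fun acc r =>
      (List.range ((g.getD r []).length)).foldl (fun acc c =>
        if (g.getD r []).getD c ' ' == t then (acc.1 ++ [r], acc.2 ++ [c]) else acc) acc)
    (([] : List Nat), ([] : List Nat))
  let minr := (PySem.List.min? rc.1 (fun x => x)).getD 0
  let maxr := (PySem.List.max? rc.1 (fun x => x)).getD 0
  let minc := (PySem.List.min? rc.2 (fun x => x)).getD 0
  let maxc := (PySem.List.max? rc.2 (fun x => x)).getD 0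
  if row = minr ∧ col = minc then
    some ((if minr < maxr then [("rowspan", ((maxr : Int) - minr + 1))] else []) ++
          (if minc < maxc then [("colspan", ((maxc : Int) - minc + 1))] else []))
  else none

def pvSpecsA (g : List (List Char)) : List (List (Option (List (String × Int)))) :=
  (List.range g.length).map (fun r =>
    (List.range ((g.getD r []).length)).map (fun c => pvSpecA g r c))

def get_specs_from_mosaic (mosaic : String) : List (List (Option (List (String × Int)))) :=
  pvSpecsA (pvGrid mosaic)

-- ===== PORT B =====
-- one bounds-update step of B's first pass
def pvStepB (d : PySem.Dict Char (Nat × Nat × Nat × Nat)) (x : Nat × Nat × Char) :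
    PySem.Dict Char (Nat × Nat × Nat × Nat) :=
  match d.get? x.2.2 with
  | none => d.insert x.2.2 (x.1, x.1, x.2.1, x.2.1)
  | some (r0, r1, c0, c1) =>
      d.insert x.2.2 (min r0 x.1, max r1 x.1, min c0 x.2.1, max c1 x.2.1)

-- B's first pass: bounds[ch] = (min row, max row, min col, max col)
def pvBoundsB (g : List (List Char)) : PySem.Dict Char (Nat × Nat × Nat × Nat) :=
  g.zipIdx.foldl (fun d lr =>
    lr.1.zipIdx.foldl (fun d cc => pvStepB d (lr.2, cc.2, cc.1)) d) PySem.Dict.empty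

-- B's second pass: O(1) per cell
def pvSpecsB (g : List (List Char)) : List (List (Option (List (String × Int)))) :=
  let bounds := pvBoundsB g
  g.zipIdx.map (fun lr =>
    lr.1.zipIdx.map (fun cc =>
      let b := (bounds.get? cc.1).getD (0, 0, 0, 0)  -- key always present: recorded in the first pass
      if lr.2 = b.1 ∧ cc.2 = b.2.2.1 then
        some ((if b.1 < b.2.1 then [("rowspan", ((b.2.1 : Int) - b.1 + 1))] else []) ++
              (if b.2.2.1 < b.2.2.2 then [("colspan", ((b.2.2.2 : Int) - b.2.2.1 + 1))] else []))
      else none))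

def get_specs_from_mosaic_alt (mosaic : String) : List (List (Option (List (String × Int)))) :=
  pvSpecsB (pvGrid mosaic)

-- ===== PRECONDITION & SPEC =====
def Spec_get_specs_from_mosaic (mosaic : String) (out : List (List (Option (List (String × Int))))) : Prop := out = get_specs_from_mosaic_alt mosaic
instance (mosaic : String) (out : List (List (Option (List (String × Int))))) : Decidable (Spec_get_specs_from_mosaic mosaic out) := by unfold Spec_get_specs_from_mosaic; infer_instance

-- ===== CLAIM (what is proved, stated in full; the proofs are below) =====
def Claim_equal_get_specs_from_mosaic : Prop := ∀ (mosaic : String), Dom_get_specs_from_mosaic mosaic → Spec_get_specs_from_mosaic mosaic (get_specs_from_mosaic mosaic)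

-- ===== LEMMAS AND PROOFS =====

-- the (row, col, char) cells of the grid, in traversal order
def pvCells (g : List (List Char)) : List (Nat × Nat × Char) :=
  g.zipIdx.flatMap (fun lr => lr.1.zipIdx.map (fun cc => (lr.2, cc.2, cc.1)))

theorem pv_zipIdxC (l : List Char) :
    l.zipIdx = (List.range l.length).map (fun c => (l.getD c ' ', c)) := by
  apply List.ext_getElem
  · simp
  · intro i h1 h2
    simp [List.getElem_zipIdx, List.getD_eq_getElem?_getD,
      List.getElem?_eq_getElem (by simpa using h2)]

theorem pv_zipIdxL (l : List (List Char)) :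
    l.zipIdx = (List.range l.length).map (fun r => (l.getD r [], r)) := by
  apply List.ext_getElem
  · simp
  · intro i h1 h2
    simp [List.getElem_zipIdx, List.getD_eq_getElem?_getD,
      List.getElem?_eq_getElem (by simpa using h2)]

-- A's collection loop, generically: append-if fold = map of filter
theorem pv_pairfold (L : List (Nat × Nat × Char)) (t : Char) (a b : List Nat) :
    L.foldl (fun acc x => if x.2.2 == t then (acc.1 ++ [x.1], acc.2 ++ [x.2.1]) else acc) (a, b)
      = (a ++ (L.filter (fun x => x.2.2 == t)).map (fun x => x.1),
         b ++ (L.filter (fun x => x.2.2 == t)).map (fun x => x.2.1)) := by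
  induction L generalizing a b with
  | nil => simp
  | cons x L ih =>
    rw [List.foldl_cons, List.filter_cons]
    by_cases h : (x.2.2 == t) = true
    · rw [if_pos h, if_pos h, ih]; simp
    · rw [if_neg h, if_neg h, ih]

-- A's nested-range collection loop is the filter of pvCells
theorem pv_rc_eq (g : List (List Char)) (t : Char) :
    (List.range g.length).foldl (fun acc r =>
        (List.range ((g.getD r []).length)).foldl (fun acc c =>
          if (g.getD r []).getD c ' ' == t then (acc.1 ++ [r], acc.2 ++ [c]) else acc) acc)
      (([] : List Nat), ([] : List Nat))
      = (((pvCells g).filter (fun x => x.2.2 == t)).map (fun x => x.1),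
         ((pvCells g).filter (fun x => x.2.2 == t)).map (fun x => x.2.1)) := by
  have h : (pvCells g).foldl (fun acc x =>
          if x.2.2 == t then (acc.1 ++ [x.1], acc.2 ++ [x.2.1]) else acc)
        (([] : List Nat), ([] : List Nat))
      = (List.range g.length).foldl (fun acc r =>
        (List.range ((g.getD r []).length)).foldl (fun acc c =>
          if (g.getD r []).getD c ' ' == t then (acc.1 ++ [r], acc.2 ++ [c]) else acc) acc)
      (([] : List Nat), ([] : List Nat)) := by
    simp only [pvCells, List.foldl_flatMap, pv_zipIdxL, pv_zipIdxC, List.foldl_map]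
  rw [← h, pv_pairfold]
  simp

-- the Python value of min(xs)/max(xs) on a nonempty list
def pvMinL (m : Nat) (t : List Nat) : Nat := t.foldl min m
def pvMaxL (m : Nat) (t : List Nat) : Nat := t.foldl max m

-- dict-fold invariant: after folding any cell list, the dict maps ch to the
-- min/max bounds of the cells labelled ch, and is unset iff no such cell exists
theorem pv_bounds_invariant (L : List (Nat × Nat × Char)) (ch : Char) :
    (L.foldl pvStepB PySem.Dict.empty).get? ch
      = match L.filter (fun x => x.2.2 == ch) with
        | [] => none
        | m :: t => some (pvMinL m.1 (t.map (fun x => x.1)), pvMaxL m.1 (t.map (fun x => x.1)),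
                          pvMinL m.2.1 (t.map (fun x => x.2.1)), pvMaxL m.2.1 (t.map (fun x => x.2.1))) := by
  induction L using List.reverseRecOn with
  | nil => rfl
  | append_singleton L x ih =>
    rw [List.foldl_append, List.foldl_cons, List.foldl_nil, List.filter_append,
        List.filter_cons, List.filter_nil]
    generalize hD : L.foldl pvStepB PySem.Dict.empty = D at ih
    by_cases h : x.2.2 = ch
    · rw [if_pos (by simp [h]), pvStepB, h, ih]
      cases hf : L.filter (fun x => x.2.2 == ch) with
      | nil => simp [PySem.Dict.get?_insert_self, pvMinL, pvMaxL]
      | cons m t => simp [PySem.Dict.get?_insert_self, pvMinL, pvMaxL, List.foldl_append]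
    · have hne : ch ≠ x.2.2 := fun hh => h hh.symm
      have hstep : (pvStepB D x).get? ch = D.get? ch := by
        rw [pvStepB]
        cases D.get? x.2.2 with
        | none => exact PySem.Dict.get?_insert_of_ne D _ hne
        | some q =>
          obtain ⟨r0, r1, c0, c1⟩ := q
          exact PySem.Dict.get?_insert_of_ne D _ hne
      rw [if_neg (by simp [h]), hstep, ih]
      simp

theorem pv_boundsB_eq (g : List (List Char)) :
    pvBoundsB g = (pvCells g).foldl pvStepB PySem.Dict.empty := by
  simp only [pvBoundsB, pvCells, List.foldl_flatMap, List.foldl_map]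

-- every in-range cell occurs in pvCells with its own label
theorem pv_mem_cells (g : List (List Char)) (r c : Nat) (hr : r < g.length)
    (hc : c < (g.getD r []).length) :
    (r, c, (g.getD r []).getD c ' ') ∈ pvCells g := by
  rw [pvCells]
  simp only [List.mem_flatMap, List.mem_map]
  refine ⟨(g.getD r [], r), ?_, (((g.getD r []).getD c ' '), c), ?_, rfl⟩
  · rw [pv_zipIdxL g]
    exact List.mem_map.2 ⟨r, List.mem_range.2 hr, rfl⟩
  · rw [pv_zipIdxC (g.getD r [])]
    exact List.mem_map.2 ⟨c, List.mem_range.2 hc, rfl⟩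

-- per-cell agreement
theorem pv_cell_eq (g : List (List Char)) (r c : Nat) (hr : r < g.length)
    (hc : c < (g.getD r []).length) :
    pvSpecA g r c =
      (let b := ((pvBoundsB g).get? ((g.getD r []).getD c ' ')).getD (0, 0, 0, 0)
       if r = b.1 ∧ c = b.2.2.1 then
        some ((if b.1 < b.2.1 then [("rowspan", ((b.2.1 : Int) - b.1 + 1))] else []) ++
              (if b.2.2.1 < b.2.2.2 then [("colspan", ((b.2.2.2 : Int) - b.2.2.1 + 1))] else []))
       else none) := by
  rw [pvSpecA, pv_rc_eq, pv_boundsB_eq, pv_bounds_invariant]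
  have hmf : (r, c, (g.getD r []).getD c ' ')
      ∈ (pvCells g).filter (fun x => x.2.2 == (g.getD r []).getD c ' ') :=
    List.mem_filter.2 ⟨pv_mem_cells g r c hr hc, by simp⟩
  cases hf : (pvCells g).filter (fun x => x.2.2 == (g.getD r []).getD c ' ') with
  | nil => rw [hf] at hmf; simp at hmf
  | cons m tl =>
    simp only [List.map_cons]
    rw [PySem.List.min?_id_cons, PySem.List.max?_id_cons,
        PySem.List.min?_id_cons, PySem.List.max?_id_cons]
    simp [pvMinL, pvMaxL]

-- ===== VERDICT (by name: the statement is the Claim_ definition above) =====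
theorem get_specs_from_mosaic_spec : Claim_equal_get_specs_from_mosaic := by
  intro mosaic _
  unfold Spec_get_specs_from_mosaic get_specs_from_mosaic get_specs_from_mosaic_alt
  generalize pvGrid mosaic = g
  rw [pvSpecsA, pvSpecsB, pv_zipIdxL g, List.map_map]
  apply List.map_congr_left
  intro r hr
  have hr' : r < g.length := List.mem_range.1 hr
  simp only [Function.comp]
  rw [pv_zipIdxC (g.getD r []), List.map_map]
  apply List.map_congr_left
  intro c hc
  exact pv_cell_eq g r c hr' (List.mem_range.1 hc)
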